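-- pv_equiv track=rewrite | github.com/kannanParamasivam/datastructures_and_algorithm | fibonacci/jump_with_min_fee.py | jump_with_min_fee
-- ===== SOURCE A (Python) =====
-- from typing import List
-- import math
--
-- def jump_with_min_fee(fee: List[int]) -> int:
--
--     if not fee:
--         return 0
--
--     if len(fee) == 1:
--         return fee[0]
--
--     dp = [math.inf] * (len(fee) + 1)
--
--     dp[0] = 0
--     dp[1] = fee[0]
--     dp[2] = fee[0]
--
--     for i in range(3, len(fee)+1):
--
--         dp[i] = min(dp[i-3] + fee[i-3], dp[i-2] + fee[i-2], dp[i-1] + fee[i-1])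
--
--     return dp[-1]
-- ===== SOURCE B (Python) =====
-- def jump_with_min_fee(fee):
--     n = len(fee)
--     if n == 0:
--         return 0
--     if n == 1:
--         return fee[0]
--     # top-down: demand-driven memoization driven by an explicit work stack
--     memo = {0: 0, 1: fee[0], 2: fee[0]}
--     stack = [n]
--     while stack:
--         i = stack.pop()
--         if i in memo:
--             continue
--         if (i - 1) in memo and (i - 2) in memo and (i - 3) in memo:
--             memo[i] = min(memo[i - 3] + fee[i - 3],
--                           memo[i - 2] + fee[i - 2],
--                           memo[i - 1] + fee[i - 1])
--         else:
--             stack.append(i)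
--             stack.append(i - 1)
--     return memo[n]
-- ===== Notes on version B (the rewrite author's own statement) =====
-- stated objective: alternative
-- what changed: Replaces A's bottom-up forward fill of an (n+1)-cell dp array with top-down demand-driven memoization: a dict of solved subproblems filled on demand by an explicit work stack seeded with the target index n.
import Mathlib
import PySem

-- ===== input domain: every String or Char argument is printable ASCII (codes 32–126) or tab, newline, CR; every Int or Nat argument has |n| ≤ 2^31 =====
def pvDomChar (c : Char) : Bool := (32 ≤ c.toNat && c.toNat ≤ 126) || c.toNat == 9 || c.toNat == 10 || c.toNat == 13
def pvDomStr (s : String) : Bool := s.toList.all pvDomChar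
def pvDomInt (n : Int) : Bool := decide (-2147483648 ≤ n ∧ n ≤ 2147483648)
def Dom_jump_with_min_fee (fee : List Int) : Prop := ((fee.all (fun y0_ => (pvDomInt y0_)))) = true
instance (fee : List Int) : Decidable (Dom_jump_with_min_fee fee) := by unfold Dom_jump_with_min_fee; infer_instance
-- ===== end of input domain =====

-- B replaces A's forward array fill by demand-driven top-down memoization: a dict of solved
-- subproblems filled on demand, driven by an explicit work stack (same O(n) cost, no dp array).

-- ===== PORT A =====
-- loop body of A: dp[i] = min(dp[i-3]+fee[i-3], dp[i-2]+fee[i-2], dp[i-1]+fee[i-1])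
def pvStepA (fee : List Int) (dp : List Int) (i : Int) : List Int :=
  PySem.List.pySetD dp i
    (min (PySem.List.pyGetD dp (i - 3) 0 + PySem.List.pyGetD fee (i - 3) 0)
      (min (PySem.List.pyGetD dp (i - 2) 0 + PySem.List.pyGetD fee (i - 2) 0)
           (PySem.List.pyGetD dp (i - 1) 0 + PySem.List.pyGetD fee (i - 1) 0)))

def jump_with_min_fee (fee : List Int) : Int :=
  if fee = [] then 0
  else if fee.length = 1 then PySem.List.pyGetD fee 0 0
  else
    -- dp = [math.inf] * (len(fee)+1): the inf cells are never read before being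
    -- written when len(fee) ≥ 2 (the loop fills 3..n in order), so they are ported as 0
    let dp : List Int := List.replicate (fee.length + 1) 0
    let dp := PySem.List.pySetD dp 0 0
    let dp := PySem.List.pySetD dp 1 (PySem.List.pyGetD fee 0 0)
    let dp := PySem.List.pySetD dp 2 (PySem.List.pyGetD fee 0 0)
    let dp := (PySem.List.pyRange 3 ((fee.length : Int) + 1)).foldl (pvStepA fee) dp
    PySem.List.pyGetD dp (-1) 0

-- ===== PORT B =====
-- the while loop of B; the stack is kept TOP-FIRST (Python's list end = the head here), so
-- stack.pop() is the head and 'append i; append (i-1)' is '(i-1) :: i :: rest'.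
-- The fuel argument only makes the loop total: 2*len(fee)+4 iterations provably suffice
-- (lemmas loopB_desc/loopB_asc below). memo[...] reads are guarded by 'in memo' checks, so getD 0 is exact.
def pvLoopB (fee : List Int) : Nat → PySem.Dict Int Int → List Int → PySem.Dict Int Int
  | 0, memo, _ => memo
  | _ + 1, memo, [] => memo
  | f + 1, memo, i :: stack =>
    if memo.contains i then pvLoopB fee f memo stack
    else if memo.contains (i - 1) && memo.contains (i - 2) && memo.contains (i - 3) then
      pvLoopB fee f
        (memo.insert i
          (min (memo.getD (i - 3) 0 + PySem.List.pyGetD fee (i - 3) 0)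
            (min (memo.getD (i - 2) 0 + PySem.List.pyGetD fee (i - 2) 0)
                 (memo.getD (i - 1) 0 + PySem.List.pyGetD fee (i - 1) 0))))
        stack
    else pvLoopB fee f memo ((i - 1) :: i :: stack)

def jump_with_min_fee_alt (fee : List Int) : Int :=
  let n := fee.length
  if n = 0 then 0
  else if n = 1 then PySem.List.pyGetD fee 0 0
  else
    let memo0 : PySem.Dict Int Int :=
      PySem.Dict.ofList [(0, 0), (1, PySem.List.pyGetD fee 0 0), (2, PySem.List.pyGetD fee 0 0)]
    let memo := pvLoopB fee (2 * n + 4) memo0 [(n : Int)]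
    -- memo[n]: the key n is always present when the loop ends (proved below), so getD is exact
    memo.getD (n : Int) 0

-- ===== PRECONDITION & SPEC =====
def Spec_jump_with_min_fee (fee : List Int) (out : Int) : Prop := out = jump_with_min_fee_alt fee
instance (fee : List Int) (out : Int) : Decidable (Spec_jump_with_min_fee fee out) := by unfold Spec_jump_with_min_fee; infer_instance

-- ===== CLAIM (what is proved, stated in full; the proofs are below) =====
def Claim_equal_jump_with_min_fee : Prop := ∀ (fee : List Int), Dom_jump_with_min_fee fee → Spec_jump_with_min_fee fee (jump_with_min_fee fee)

-- ===== LEMMAS AND PROOFS =====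

-- the common recurrence value: dpf fee i = A's dp[i] = B's memo[i]
def dpf (fee : List Int) : Nat → Int
  | 0 => 0
  | 1 => PySem.List.pyGetD fee 0 0
  | 2 => PySem.List.pyGetD fee 0 0
  | (k+3) =>
      min (dpf fee k + PySem.List.pyGetD fee (k : Int) 0)
        (min (dpf fee (k+1) + PySem.List.pyGetD fee ((k : Int) + 1) 0)
             (dpf fee (k+2) + PySem.List.pyGetD fee ((k : Int) + 2) 0))

-- ---- A side: the dp array holds dpf on 0..m after the loop has run up to m ----

theorem invA (fee dp0 : List Int) (hlen : dp0.length = fee.length + 1)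
    (h0 : ∀ j : Nat, j ≤ 2 → PySem.List.pyGetD dp0 (j : Int) 0 = dpf fee j) :
    ∀ m : Nat, 2 ≤ m → m ≤ fee.length →
      ((PySem.List.pyRange 3 ((m : Int) + 1)).foldl (pvStepA fee) dp0).length = fee.length + 1 ∧
      ∀ j : Nat, j ≤ m →
        PySem.List.pyGetD ((PySem.List.pyRange 3 ((m : Int) + 1)).foldl (pvStepA fee) dp0) (j : Int) 0
          = dpf fee j := by
  intro m hm hmn
  obtain ⟨k, rfl⟩ : ∃ k, m = k + 2 := ⟨m - 2, by omega⟩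
  clear hm
  induction k with
  | zero =>
      rw [PySem.List.pyRange_one_eq_nil (by norm_num)]
      exact ⟨hlen, fun j hj => h0 j hj⟩
  | succ k ih =>
      obtain ⟨ihlen, ihget⟩ := ih (by omega)
      have hsplit : PySem.List.pyRange 3 ((((k+1)+2 : Nat) : Int) + 1)
          = PySem.List.pyRange 3 (((k+2 : Nat) : Int) + 1) ++ [((k+2 : Nat) : Int) + 1] := by
        have h := PySem.List.pyRange_one_succ_right (a := 3) (b := ((k+2 : Nat) : Int) + 1) (by push_cast; omega)
        rw [← h]; congr 1
      rw [hsplit, List.foldl_append]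
      simp only [List.foldl_cons, List.foldl_nil]
      set dpm := (PySem.List.pyRange 3 (((k+2 : Nat) : Int) + 1)).foldl (pvStepA fee) dp0 with hdpm
      unfold pvStepA
      have e3 : ((k+2 : Nat) : Int) + 1 - 3 = ((k : Nat) : Int) := by push_cast; ring
      have e2 : ((k+2 : Nat) : Int) + 1 - 2 = ((k+1 : Nat) : Int) := by push_cast; ring
      have e1 : ((k+2 : Nat) : Int) + 1 - 1 = ((k+2 : Nat) : Int) := by push_cast; ring
      have eS : ((k+2 : Nat) : Int) + 1 = ((k+3 : Nat) : Int) := by push_cast; ring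
      rw [e3, e2, e1, eS]
      rw [ihget k (by omega), ihget (k+1) (by omega), ihget (k+2) (by omega)]
      constructor
      · rw [PySem.List.length_pySetD]; exact ihlen
      · intro j hj
        rw [PySem.List.pyGetD_pySetD_natCast dpm (k+3) j _ 0 (by rw [ihlen]; omega)]
        by_cases hje : j = k + 3
        · subst hje; rw [if_pos rfl]
          simp only [dpf]
          push_cast
          rfl
        · rw [if_neg hje, ihget j (by omega)]

theorem portA_eq (fee : List Int) (h2 : 2 ≤ fee.length) :
    jump_with_min_fee fee = dpf fee fee.length := by
  unfold jump_with_min_fee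
  rw [if_neg (by intro h; rw [h] at h2; simp at h2), if_neg (by omega)]
  have hrep : List.replicate (fee.length + 1) (0:Int)
      = 0 :: 0 :: 0 :: List.replicate (fee.length - 2) 0 := by
    rw [show fee.length + 1 = (fee.length - 2) + 1 + 1 + 1 by omega]
    simp [List.replicate_succ]
  set dp0 := PySem.List.pySetD (PySem.List.pySetD (PySem.List.pySetD
      (List.replicate (fee.length + 1) (0:Int)) 0 0) 1 (PySem.List.pyGetD fee 0 0)) 2
      (PySem.List.pyGetD fee 0 0) with hdp0
  have hdp0' : dp0 = 0 :: PySem.List.pyGetD fee 0 0 :: PySem.List.pyGetD fee 0 0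
      :: List.replicate (fee.length - 2) 0 := by
    rw [hdp0, hrep]
    rw [PySem.List.pySetD_of_nonneg _ _ (by norm_num),
        PySem.List.pySetD_of_nonneg _ _ (by norm_num),
        PySem.List.pySetD_of_nonneg _ _ (by norm_num)]
    rfl
  have hlen : dp0.length = fee.length + 1 := by
    rw [hdp0']; simp; omega
  have h0 : ∀ j : Nat, j ≤ 2 → PySem.List.pyGetD dp0 (j : Int) 0 = dpf fee j := by
    intro j hj
    rw [PySem.List.pyGetD_natCast, hdp0']
    interval_cases j <;> simp [dpf]
  obtain ⟨hflen, hfget⟩ := invA fee dp0 hlen h0 fee.length h2 le_rfl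
  set dpF := (PySem.List.pyRange 3 ((fee.length : Int) + 1)).foldl (pvStepA fee) dp0 with hdpF
  show PySem.List.pyGetD dpF (-1) 0 = dpf fee fee.length
  rw [show (-1 : Int) = -((1:Nat):Int) by norm_num,
      PySem.List.pyGetD_neg_natCast dpF 1 0 (by omega) (by omega)]
  have := hfget fee.length le_rfl
  rw [PySem.List.pyGetD_natCast] at this
  rw [← this, List.getD_eq_getElem _ _ (by omega)]
  congr 1
  omega

-- ---- B side: memoTo m is B's memo once indices 3..m are solved ----

def memoBase (fee : List Int) : PySem.Dict Int Int :=
  PySem.Dict.ofList [(0, 0), (1, PySem.List.pyGetD fee 0 0), (2, PySem.List.pyGetD fee 0 0)]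

def memoTo (fee : List Int) : Nat → PySem.Dict Int Int
  | 0 => memoBase fee
  | 1 => memoBase fee
  | 2 => memoBase fee
  | (m+3) => (memoTo fee (m+2)).insert ((m+3 : Nat) : Int) (dpf fee (m+3))

theorem memoBase_eq (fee : List Int) : memoBase fee =
    ((PySem.Dict.empty.insert 0 0).insert 1 (PySem.List.pyGetD fee 0 0)).insert 2 (PySem.List.pyGetD fee 0 0) := rfl

theorem contains_memoBase (fee : List Int) (j : Int) :
    (memoBase fee).contains j = decide (0 ≤ j ∧ j ≤ 2) := by
  rw [memoBase_eq]
  simp only [PySem.Dict.contains_insert, PySem.Dict.contains_empty, Bool.or_false]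
  rw [Bool.eq_iff_iff]; simp; omega

theorem getD_memoBase (fee : List Int) (j : Nat) (h : j ≤ 2) :
    (memoBase fee).getD (j : Int) 0 = dpf fee j := by
  rw [memoBase_eq]
  simp only [PySem.Dict.getD_insert]
  interval_cases j <;> simp [dpf]

theorem contains_memoTo (fee : List Int) (m : Nat) (j : Int) :
    (memoTo fee m).contains j = decide (0 ≤ j ∧ j ≤ max 2 m) := by
  induction m with
  | zero => simpa using contains_memoBase fee j
  | succ m ih =>
      match m, ih with
      | 0, _ => simpa using contains_memoBase fee j
      | 1, _ => simpa using contains_memoBase fee j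
      | (k+2), ih =>
          show ((memoTo fee (k+2)).insert ((k+3 : Nat) : Int) (dpf fee (k+3))).contains j = _
          rw [PySem.Dict.contains_insert, ih]
          rw [Bool.eq_iff_iff]; simp; omega

theorem getD_memoTo (fee : List Int) (m : Nat) (j : Nat) (hj : j ≤ max 2 m) :
    (memoTo fee m).getD (j : Int) 0 = dpf fee j := by
  induction m with
  | zero => exact getD_memoBase fee j (by omega)
  | succ m ih =>
      match m, ih with
      | 0, _ => exact getD_memoBase fee j (by omega)
      | 1, _ => exact getD_memoBase fee j (by omega)
      | (k+2), ih =>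
          show ((memoTo fee (k+2)).insert ((k+3 : Nat) : Int) (dpf fee (k+3))).getD (j : Int) 0 = _
          rw [PySem.Dict.getD_insert]
          by_cases hje : j = k + 3
          · rw [if_pos (by exact_mod_cast congrArg (Nat.cast : Nat → Int) hje), hje]
          · rw [if_neg (by exact_mod_cast hje), ih (by omega)]

-- the stack [m+1, m+2, …, n], top first
def stackFrom (m n : Nat) : List Int := (List.range' (m+1) (n-m)).map (fun k => (k : Int))

theorem stackFrom_nil (n : Nat) : stackFrom n n = [] := by simp [stackFrom]

theorem stackFrom_cons (m n : Nat) (h : m < n) :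
    stackFrom m n = ((m+1 : Nat) : Int) :: stackFrom (m+1) n := by
  unfold stackFrom
  rw [show n - m = (n - (m+1)) + 1 by omega, List.range'_succ]
  simp

theorem pvLoopB_nil (fee : List Int) (memo : PySem.Dict Int Int) (fuel : Nat) :
    pvLoopB fee fuel memo [] = memo := by
  cases fuel <;> rfl

-- ascent: with memo = memoTo (k+2) and the pending stack [k+3, …, n], every pop solves the top index
theorem loopB_asc (fee : List Int) (n : Nat) :
    ∀ s k fuel : Nat, (k + 2) + s = n → s ≤ fuel →
      pvLoopB fee fuel (memoTo fee (k+2)) (stackFrom (k+2) n) = memoTo fee n := by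
  intro s
  induction s with
  | zero =>
      intro k fuel hn _
      subst hn
      rw [stackFrom_nil, pvLoopB_nil]
  | succ s ih =>
      intro k fuel hn hfuel
      obtain ⟨f, rfl⟩ : ∃ f, fuel = f + 1 := ⟨fuel - 1, by omega⟩
      rw [stackFrom_cons _ _ (by omega)]
      show pvLoopB fee (f+1) (memoTo fee (k+2)) (((k+3 : Nat) : Int) :: stackFrom (k+3) n) = _
      rw [pvLoopB]
      rw [contains_memoTo]
      rw [if_neg (by simp)]
      have hc1 : (memoTo fee (k+2)).contains (((k+3 : Nat) : Int) - 1) = true := by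
        rw [contains_memoTo]; simp; try omega
      have hc2 : (memoTo fee (k+2)).contains (((k+3 : Nat) : Int) - 2) = true := by
        rw [contains_memoTo]; simp; try omega
      have hc3 : (memoTo fee (k+2)).contains (((k+3 : Nat) : Int) - 3) = true := by
        rw [contains_memoTo]; simp; try omega
      rw [hc1, hc2, hc3]
      simp only [Bool.and_self, if_true]
      have e3 : ((k+3 : Nat) : Int) - 3 = ((k : Nat) : Int) := by push_cast; ring
      have e2 : ((k+3 : Nat) : Int) - 2 = ((k+1 : Nat) : Int) := by push_cast; ring
      have e1 : ((k+3 : Nat) : Int) - 1 = ((k+2 : Nat) : Int) := by push_cast; ring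
      rw [e3, e2, e1]
      rw [getD_memoTo fee (k+2) k (by omega), getD_memoTo fee (k+2) (k+1) (by omega),
          getD_memoTo fee (k+2) (k+2) (by omega)]
      have hins : (memoTo fee (k+2)).insert ((k+3 : Nat) : Int)
          (min (dpf fee k + PySem.List.pyGetD fee ((k : Nat) : Int) 0)
            (min (dpf fee (k+1) + PySem.List.pyGetD fee ((k+1 : Nat) : Int) 0)
                 (dpf fee (k+2) + PySem.List.pyGetD fee ((k+2 : Nat) : Int) 0)))
          = memoTo fee (k+3) := by
        show _ = (memoTo fee (k+2)).insert ((k+3 : Nat) : Int) (dpf fee (k+3))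
        congr 1
      rw [hins]
      exact ih (k+1) f (by omega) (by omega)

-- descent: with memo = memoBase and stack [s+3, …, n], indices are pushed down to 3, then the ascent runs
theorem loopB_desc (fee : List Int) (n : Nat) (hn : 3 ≤ n) :
    ∀ s fuel : Nat, s + 3 ≤ n → s + 1 + (n - 3) ≤ fuel →
      pvLoopB fee fuel (memoBase fee) (stackFrom (s + 2) n) = memoTo fee n := by
  intro s
  induction s with
  | zero =>
      intro fuel hjn hfuel
      obtain ⟨f, rfl⟩ : ∃ f, fuel = f + 1 := ⟨fuel - 1, by omega⟩
      rw [stackFrom_cons _ _ (by omega)]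
      show pvLoopB fee (f+1) (memoBase fee) (((3 : Nat) : Int) :: stackFrom 3 n) = _
      rw [pvLoopB, contains_memoBase]
      rw [if_neg (by simp)]
      have hc : ∀ d : Int, 1 ≤ d → d ≤ 3 → (memoBase fee).contains (((3 : Nat) : Int) - d) = true := by
        intro d h1 h3; rw [contains_memoBase]; simp; omega
      rw [hc 1 (by norm_num) (by norm_num), hc 2 (by norm_num) (by norm_num),
          hc 3 (by norm_num) (by norm_num)]
      simp only [Bool.and_self, if_true]
      have e3 : ((3 : Nat) : Int) - 3 = ((0 : Nat) : Int) := by norm_num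
      have e2 : ((3 : Nat) : Int) - 2 = ((1 : Nat) : Int) := by norm_num
      have e1 : ((3 : Nat) : Int) - 1 = ((2 : Nat) : Int) := by norm_num
      rw [e3, e2, e1]
      rw [getD_memoBase fee 0 (by omega), getD_memoBase fee 1 (by omega),
          getD_memoBase fee 2 (by omega)]
      have hins : (memoBase fee).insert ((3 : Nat) : Int)
          (min (dpf fee 0 + PySem.List.pyGetD fee ((0 : Nat) : Int) 0)
            (min (dpf fee 1 + PySem.List.pyGetD fee ((1 : Nat) : Int) 0)
                 (dpf fee 2 + PySem.List.pyGetD fee ((2 : Nat) : Int) 0)))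
          = memoTo fee 3 := by
        show _ = (memoTo fee 2).insert ((0 + 3 : Nat) : Int) (dpf fee (0 + 3))
        congr 1
      rw [hins]
      show pvLoopB fee f (memoTo fee (1 + 2)) (stackFrom (1 + 2) n) = memoTo fee n
      exact loopB_asc fee n (n - 3) 1 f (by omega) (by omega)
  | succ s ih =>
      intro fuel hjn hfuel
      obtain ⟨f, rfl⟩ : ∃ f, fuel = f + 1 := ⟨fuel - 1, by omega⟩
      rw [stackFrom_cons _ _ (by omega)]
      show pvLoopB fee (f+1) (memoBase fee) (((s+4 : Nat) : Int) :: stackFrom (s+4) n) = _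
      rw [pvLoopB, contains_memoBase]
      rw [if_neg (by simp; omega)]
      have hc1 : (memoBase fee).contains (((s+4 : Nat) : Int) - 1) = false := by
        rw [contains_memoBase]; simp; omega
      rw [hc1]
      simp only [Bool.false_and, Bool.false_eq_true, if_false]
      have hst : (((s+4 : Nat) : Int) - 1) :: ((s+4 : Nat) : Int) :: stackFrom (s+4) n
          = stackFrom (s + 2) n := by
        rw [stackFrom_cons (s+2) n (by omega), stackFrom_cons (s+3) n (by omega)]
        congr 1
        push_cast
        ring
      rw [hst]
      exact ih f (by omega) (by omega)

theorem portB_eq (fee : List Int) (h2 : 2 ≤ fee.length) :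
    jump_with_min_fee_alt fee = dpf fee fee.length := by
  unfold jump_with_min_fee_alt
  rw [if_neg (by omega), if_neg (by omega)]
  show (pvLoopB fee (2 * fee.length + 4) (memoBase fee) [((fee.length : Nat) : Int)]).getD
      ((fee.length : Nat) : Int) 0 = _
  by_cases h3 : 3 ≤ fee.length
  · have hstack : [((fee.length : Nat) : Int)] = stackFrom ((fee.length - 3) + 2) fee.length := by
      rw [stackFrom_cons _ _ (by omega),
          show fee.length - 3 + 2 + 1 = fee.length from by omega, stackFrom_nil]
    rw [hstack, loopB_desc fee fee.length h3 (fee.length - 3) _ (by omega) (by omega)]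
    exact getD_memoTo fee fee.length fee.length (by omega)
  · have h2' : fee.length = 2 := by omega
    rw [h2']
    rw [show 2 * 2 + 4 = 8 by norm_num]
    rw [show ((2 : Nat) : Int) = (2 : Int) by norm_num]
    rw [pvLoopB]
    rw [if_pos (by rw [contains_memoBase]; simp)]
    rw [pvLoopB_nil]
    have := getD_memoBase fee 2 (by omega)
    rw [show ((2 : Nat) : Int) = (2 : Int) by norm_num] at this
    exact this

-- ===== VERDICT (by name: the statement is the Claim_ definition above) =====
theorem jump_with_min_fee_spec : Claim_equal_jump_with_min_fee := by
  intro fee _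
  unfold Spec_jump_with_min_fee
  by_cases hnil : fee = []
  · subst hnil; rfl
  · have hl0 : fee.length ≠ 0 := by simpa [List.length_eq_zero_iff] using hnil
    by_cases h1 : fee.length = 1
    · show jump_with_min_fee fee = jump_with_min_fee_alt fee
      unfold jump_with_min_fee jump_with_min_fee_alt
      rw [if_neg hnil, if_neg hl0, if_pos h1, if_pos h1]
    · have h2 : 2 ≤ fee.length := by omega
      rw [portA_eq fee h2, portB_eq fee h2]
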